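-- pv_equiv track=rewrite | github.com/kbuzanova/Homework-1-algorithms-and-data-structure | task 5.py | calculations
-- ===== SOURCE A (Python) =====
-- class minimumstack:
--     def __init__(self):
--         self.stack = []
--         self.min_stack = []
--
--     def push(self, value):
--         self.stack.append(value)
--         if not self.min_stack or value <= self.min_stack[-1]:
--             self.min_stack.append(value)
--
--     def pop(self):
--         if not self.stack:
--             return
--         popped_value = self.stack.pop()
--         if popped_value == self.min_stack[-1]:
--             self.min_stack.pop()
--
--     def minimum(self):
--         if not self.min_stack:
--             return None
--         return self.min_stack[-1]
--
-- def calculations(n, a, b, c, x0):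
--     total_sum = 0
--     x = x0
--     stack = minimumstack()
--
--     for _ in range(n):
--         x = ((a * x0 * x0 + b * x0 + c) // 100) % 1000000
--
--         if x % 5 < 2:
--             stack.pop()
--         else:
--             stack.push(x)
--
--         if stack.stack:
--             min_value = stack.minimum()
--             if min_value is not None:
--                 total_sum += min_value
--
--         x0 = x
--
--     return total_sum
-- ===== SOURCE B (Python) =====
-- def calculations(n, a, b, c, x0):
--     # Stage 1: unfold the recurrence into the list of x values.
--     xs = []
--     x = x0
--     for _ in range(n):
--         x = ((a * x * x + b * x + c) // 100) % 1000000
--         xs.append(x)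
--     # Stage 2: replay the operations on a run-length-encoded monotonic stack:
--     # runs[-1] = (v, k) means the top k stack slots all have current minimum v;
--     # the v's are strictly decreasing toward the top. No raw values are kept.
--     total = 0
--     runs = []
--     for x in xs:
--         if x % 5 < 2:
--             if runs:
--                 v, k = runs[-1]
--                 if k == 1:
--                     runs.pop()
--                 else:
--                     runs[-1] = (v, k - 1)
--         else:
--             if runs and runs[-1][0] <= x:
--                 v, k = runs[-1]
--                 runs[-1] = (v, k + 1)
--             else:
--                 runs.append((x, 1))
--         if runs:
--             total += runs[-1][0]
--     return total
-- ===== Notes on version B (the rewrite author's own statement) =====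
-- stated objective: alternative
-- what changed: Splits A's single pass into two staged passes (first unfold the recurrence into the list of x values, then replay the operations over that list) and replaces the minimumstack class (value stack + parallel min-stack) by a run-length-encoded monotonic stack of (minimum, count) pairs that stores no raw values at all: push either increments the top count or starts a new run, pop decrements it, and the current minimum is the top run's value.
import Mathlib
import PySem

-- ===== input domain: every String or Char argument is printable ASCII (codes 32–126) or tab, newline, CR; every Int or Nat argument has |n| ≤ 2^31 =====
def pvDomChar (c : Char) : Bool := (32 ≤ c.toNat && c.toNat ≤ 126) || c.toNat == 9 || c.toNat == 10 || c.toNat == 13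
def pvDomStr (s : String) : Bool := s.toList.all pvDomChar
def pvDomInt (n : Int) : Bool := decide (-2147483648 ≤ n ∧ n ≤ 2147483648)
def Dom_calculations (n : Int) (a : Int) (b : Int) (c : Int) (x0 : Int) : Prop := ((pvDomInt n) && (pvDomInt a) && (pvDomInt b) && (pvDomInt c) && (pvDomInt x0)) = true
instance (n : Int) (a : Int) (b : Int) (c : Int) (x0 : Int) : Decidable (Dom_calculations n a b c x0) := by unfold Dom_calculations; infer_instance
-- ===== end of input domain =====

-- B replaces A's one-pass value-stack + parallel min-stack by two staged passes: first unfold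
-- the recurrence into the list of x values, then replay the operations on a run-length-encoded
-- monotonic stack of (minimum, count) pairs that stores no raw values (objective: alternative).

-- ===== PORT A =====
-- minimumstack.push
def msPush (st : List Int × List Int) (v : Int) : List Int × List Int :=
  (v :: st.1, if st.2 = [] ∨ v ≤ st.2.headI then v :: st.2 else st.2)

-- minimumstack.pop: silent no-op on an empty stack; when the stack is non-empty the class
-- invariant keeps min_stack non-empty, so comparing popped_value with head? is exact here
def msPop (st : List Int × List Int) : List Int × List Int :=
  match st.1 with
  | [] => st
  | h :: t => (t, if st.2.head? = some h then st.2.tail else st.2)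

def calcA_loop (a b c : Int) : Nat → Int → Int → List Int × List Int → Int
  | 0, _, total, _ => total
  | Nat.succ k, x0, total, st =>
    let x := PySem.Int.mod (PySem.Int.floordiv (a * x0 * x0 + b * x0 + c) 100) 1000000
    let st' := if PySem.Int.mod x 5 < 2 then msPop st else msPush st x
    let total' :=
      if st'.1 ≠ [] then
        -- minimum(): None when min_stack is empty, else its top
        match st'.2.head? with
        | some v => total + v
        | none => total
      else total
    calcA_loop a b c k x total' st'

def calculations (n : Int) (a : Int) (b : Int) (c : Int) (x0 : Int) : Int :=
  calcA_loop a b c n.toNat x0 0 ([], [])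

-- ===== PORT B =====
-- Stage 1 of Source B: the list of x values produced by the recurrence; xs.append(x) is the
-- accumulator cons, reversed at the end (tail recursion, like the Python loop)
def genXs (a b c : Int) : Nat → Int → List Int → List Int
  | 0, _, acc => acc.reverse
  | Nat.succ k, x0, acc =>
    let x := PySem.Int.mod (PySem.Int.floordiv (a * x0 * x0 + b * x0 + c) 100) 1000000
    genXs a b c k x (x :: acc)

-- Stage 2 of Source B, one step: runs is the RLE monotonic stack, top = list head;
-- runs[-1] = (v, k): the top k slots have minimum v, v's strictly decreasing toward the top
def calcB_step (st : Int × List (Int × Nat)) (x : Int) : Int × List (Int × Nat) :=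
  let runs :=
    if PySem.Int.mod x 5 < 2 then
      match st.2 with
      | [] => st.2
      | (v, k) :: t => if k = 1 then t else (v, k - 1) :: t
    else
      match st.2 with
      | [] => (x, 1) :: st.2
      | (v, k) :: t => if v ≤ x then (v, k + 1) :: t else (x, 1) :: (v, k) :: t
  match runs with
  | [] => (st.1, runs)
  | (v, _) :: _ => (st.1 + v, runs)

def calculations_alt (n : Int) (a : Int) (b : Int) (c : Int) (x0 : Int) : Int :=
  ((genXs a b c n.toNat x0 []).foldl calcB_step (0, [])).1

-- ===== PRECONDITION & SPEC =====
def Spec_calculations (n : Int) (a : Int) (b : Int) (c : Int) (x0 : Int) (out : Int) : Prop := out = calculations_alt n a b c x0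
instance (n : Int) (a : Int) (b : Int) (c : Int) (x0 : Int) (out : Int) : Decidable (Spec_calculations n a b c x0 out) := by unfold Spec_calculations; infer_instance

-- ===== CLAIM (what is proved, stated in full; the proofs are below) =====
def Claim_equal_calculations : Prop := ∀ (n : Int) (a : Int) (b : Int) (c : Int) (x0 : Int), Dom_calculations n a b c x0 → Spec_calculations n a b c x0 (calculations n a b c x0)

-- ===== LEMMAS AND PROOFS =====

-- msOf s: the min_stack A's class holds when its plain stack is s
def msOf (s : List Int) : List Int :=
  s.foldr (fun v m => if m = [] ∨ v ≤ m.headI then v :: m else m) []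

-- rm s: the RLE monotonic stack B holds when A's plain stack is s
def rm : List Int → List (Int × Nat)
  | [] => []
  | x :: s =>
    match rm s with
    | [] => [(x, 1)]
    | (v, k) :: t => if v ≤ x then (v, k + 1) :: t else (x, 1) :: (v, k) :: t

theorem foldl_min_cons (u : List Int) : ∀ (a b : Int),
    List.foldl min (min a b) u = min a (List.foldl min b u) := by
  induction u with
  | nil => intro a b; simp
  | cons z w ih =>
    intro a b
    simp only [List.foldl]
    rw [min_assoc, ih]

theorem msOf_head_cons (t : List Int) : ∀ (x : Int),
    (msOf (x :: t)).head? = some (List.foldl min x t) := by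
  induction t with
  | nil => intro x; simp [msOf]
  | cons y u ih =>
    intro x
    have ihy := ih y
    cases hms : msOf (y :: u) with
    | nil => rw [hms] at ihy; simp at ihy
    | cons m rest =>
      rw [hms] at ihy
      simp only [List.head?] at ihy
      have hm : m = List.foldl min y u := by injection ihy
      have : msOf (x :: y :: u) =
          if msOf (y :: u) = [] ∨ x ≤ (msOf (y :: u)).headI then x :: msOf (y :: u)
          else msOf (y :: u) := rfl
      rw [this, hms]
      have hfold : List.foldl min x (y :: u) = min x m := by
        simp only [List.foldl]; rw [foldl_min_cons, hm]
      by_cases hx : x ≤ m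
      · simp [List.headI, hx, hfold]
      · rw [if_neg (by simp [List.headI]; omega)]
        rw [hfold]
        simp [min_eq_right (le_of_not_ge hx)]

theorem msOf_pop (h : Int) (t : List Int) :
    msPop (h :: t, msOf (h :: t)) = (t, msOf t) := by
  have hdef : msOf (h :: t) =
      if msOf t = [] ∨ h ≤ (msOf t).headI then h :: msOf t else msOf t := rfl
  by_cases hc : msOf t = [] ∨ h ≤ (msOf t).headI
  · rw [msPop, hdef, if_pos hc]
    simp
  · push_neg at hc
    rw [msPop, hdef, if_neg (by push_neg; exact hc)]
    cases hms : msOf t with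
    | nil => exact absurd hms hc.1
    | cons m rest =>
      rw [hms] at hc
      have hmh : m ≠ h := by
        have h2 := hc.2
        simp [List.headI] at h2
        omega
      simp [hmh]

theorem rm_ne (x : Int) (s : List Int) : rm (x :: s) ≠ [] := by
  rw [rm]
  cases rm s with
  | nil => simp
  | cons p t =>
    obtain ⟨v, k⟩ := p
    by_cases h : v ≤ x <;> simp [h]

-- the head value of rm (x :: s) is the minimum of x :: s
theorem rm_head (s : List Int) : ∀ (x : Int),
    (rm (x :: s)).headI.1 = List.foldl min x s := by
  induction s with
  | nil => intro x; simp [rm]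
  | cons y u ih =>
    intro x
    cases hr : rm (y :: u) with
    | nil => exact absurd hr (rm_ne y u)
    | cons p t =>
      obtain ⟨v, k⟩ := p
      have hv : v = List.foldl min y u := by
        have := ih y
        rw [hr] at this
        simpa using this
      have hdef : rm (x :: y :: u) =
          match rm (y :: u) with
          | [] => [(x, 1)]
          | (v, k) :: t => if v ≤ x then (v, k + 1) :: t else (x, 1) :: (v, k) :: t := rfl
      rw [hdef, hr]
      have hfold : List.foldl min x (y :: u) = min x v := by
        simp only [List.foldl]; rw [foldl_min_cons, hv]
      by_cases h : v ≤ x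
      · simp [h, hfold]
      · simp [h, hfold, min_eq_left (le_of_not_ge h)]

-- all counts produced by rm are positive (only the head's is needed)
theorem rm_head_pos (s : List Int) (v : Int) (k : Nat) (t : List (Int × Nat))
    (h : rm s = (v, k) :: t) : 1 ≤ k := by
  cases s with
  | nil => simp [rm] at h
  | cons y u =>
    rw [rm] at h
    cases hru : rm u with
    | nil =>
      rw [hru] at h
      simp at h
      omega
    | cons p t'
    =>
      obtain ⟨w, j⟩ := p
      rw [hru] at h
      by_cases hw : w ≤ y
      · simp only [hw, if_true] at h
        simp at h
        omega
      · simp only [hw, if_false] at h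
        simp at h
        omega

-- B's pop code, applied to rm s, undoes the most recent push
theorem rm_pop (s : List Int) :
    (match rm s with
     | [] => rm s
     | (v, k) :: t => if k = 1 then t else (v, k - 1) :: t) = rm s.tail := by
  cases s with
  | nil => rfl
  | cons x u =>
    show (match rm (x :: u) with
          | [] => rm (x :: u)
          | (v, k) :: t => if k = 1 then t else (v, k - 1) :: t) = rm u
    rw [rm]
    cases hu : rm u with
    | nil => simp
    | cons p t
    =>
      obtain ⟨v, k⟩ := p
      have hk : 1 ≤ k := rm_head_pos u v k t hu
      by_cases hv : v ≤ x
      · simp only [hv, if_true]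
        rw [if_neg (by omega)]
        simp
      · simp [hv]

-- the list genXs produces, written as plain structural recursion
def xsSpec (a b c : Int) : Nat → Int → List Int
  | 0, _ => []
  | Nat.succ k, x0 =>
    let x := PySem.Int.mod (PySem.Int.floordiv (a * x0 * x0 + b * x0 + c) 100) 1000000
    x :: xsSpec a b c k x

theorem genXs_eq (a b c : Int) (k : Nat) : ∀ (x0 : Int) (acc : List Int),
    genXs a b c k x0 acc = acc.reverse ++ xsSpec a b c k x0 := by
  induction k with
  | zero => intro x0 acc; simp [genXs, xsSpec]
  | succ k ih =>
    intro x0 acc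
    rw [genXs, xsSpec, ih]
    simp

-- A's "add the min-stack top" step equals B's "add the RLE head value" step
theorem sum_step_agree (s : List Int) (total : Int) :
    (if s ≠ [] then
        match (msOf s).head? with
        | some v => total + v
        | none => total
      else total)
    = (match rm s with
       | [] => total
       | (v, _) :: _ => total + v) := by
  cases s with
  | nil => simp [rm]
  | cons h t =>
    cases hr : rm (h :: t) with
    | nil => exact absurd hr (rm_ne h t)
    | cons p t'
    =>
      obtain ⟨v, k⟩ := p
      have hv : v = List.foldl min h t := by
        have := rm_head t h
        rw [hr] at this
        simpa using this
      simp [msOf_head_cons t h, hv]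

theorem loop_eq (a b c : Int) (k : Nat) :
    ∀ (x0 total : Int) (s : List Int),
      calcA_loop a b c k x0 total (s, msOf s)
        = ((xsSpec a b c k x0).foldl calcB_step (total, rm s)).1 := by
  induction k with
  | zero => intro x0 total s; rfl
  | succ k ih =>
    intro x0 total s
    rw [calcA_loop, xsSpec]
    simp only [List.foldl]
    set x := PySem.Int.mod (PySem.Int.floordiv (a * x0 * x0 + b * x0 + c) 100) 1000000 with hx
    set s' := if PySem.Int.mod x 5 < 2 then s.tail else x :: s with hs'
    have hstA : (if PySem.Int.mod x 5 < 2 then msPop (s, msOf s) else msPush (s, msOf s) x)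
        = (s', msOf s') := by
      rw [hs']
      by_cases hmod : PySem.Int.mod x 5 < 2
      · rw [if_pos hmod, if_pos hmod]
        cases s with
        | nil => rfl
        | cons h t => exact msOf_pop h t
      · rw [if_neg hmod, if_neg hmod]
        rfl
    have hruns : (if PySem.Int.mod x 5 < 2 then
          match rm s with
          | [] => rm s
          | (v, k') :: t => if k' = 1 then t else (v, k' - 1) :: t
        else
          match rm s with
          | [] => (x, 1) :: rm s
          | (v, k') :: t => if v ≤ x then (v, k' + 1) :: t else (x, 1) :: (v, k') :: t)
        = rm s' := by
      rw [hs']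
      by_cases hmod : PySem.Int.mod x 5 < 2
      · rw [if_pos hmod, if_pos hmod]
        exact rm_pop s
      · rw [if_neg hmod, if_neg hmod]
        rw [rm]
        cases rm s with
        | nil => rfl
        | cons p t => rfl
    have hstep : calcB_step (total, rm s) x =
        ((match rm s' with
          | [] => total
          | (v, _) :: _ => total + v), rm s') := by
      simp only [calcB_step]
      rw [hruns]
      cases rm s' with
      | nil => rfl
      | cons p t => obtain ⟨v, k'⟩ := p; rfl
    rw [hstA, hstep]
    show calcA_loop a b c k x
        (if s' ≠ [] then
          match (msOf s').head? with
          | some v => total + v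
          | none => total
        else total) (s', msOf s')
      = (List.foldl calcB_step
          ((match rm s' with
            | [] => total
            | (v, _) :: _ => total + v), rm s')
          (xsSpec a b c k x)).1
    rw [sum_step_agree s' total]
    exact ih x _ s'

-- ===== VERDICT (by name: the statement is the Claim_ definition above) =====
theorem calculations_spec : Claim_equal_calculations := by
  intro n a b c x0 _
  unfold Spec_calculations calculations calculations_alt
  rw [genXs_eq]
  simpa [msOf, rm] using loop_eq a b c n.toNat x0 0 []
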